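-- pv_equiv track=rewrite | github.com/nathanoschmidt/tri-quarter-toolbox | simulation/radial_dual_triangular_lattice_graph/get_vertex_counts.py | compute_representations
-- ===== SOURCE A (Python) =====
-- import math
--
-- def compute_representations(max_nsq):
--     """Compute the number of representations of integers as sums of three squares in the triangular lattice."""
--     representations = {}  # Dictionary to store the count of representations for each nsq
--     max_m = int(math.ceil(math.sqrt(max_nsq))) + 10  # Safe range for m, n to cover all possible nsq <= max_nsq
--     for m in range(-max_m, max_m + 1):  # Loop over possible m values
--         for n in range(-max_m, max_m + 1):  # Loop over possible n values
--             if m == 0 and n == 0: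
--                 continue  # Skip the origin
--             nsq = m * m + m * n + n * n  # Compute the squared norm in triangular lattice
--             if nsq > max_nsq:
--                 continue  # Skip if beyond the maximum
--             if nsq not in representations:
--                 representations[nsq] = 0  # Initialize count if not present
--             representations[nsq] += 1  # Increment the representation count
--     return representations
-- ===== SOURCE B (Python) =====
-- import math
--
-- def compute_representations(max_nsq):
--     """Compute the number of representations of integers as sums of three squares in the triangular lattice."""
--     s = math.isqrt(max_nsq)  # raises ValueError on negative input, as math.sqrt does in the original
--     max_m = (s if s * s == max_nsq else s + 1) + 10  # same safe bound as the original
--     representations = {}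
--     for m in range(-max_m, max_m + 1):
--         disc = 4 * max_nsq - 3 * m * m  # nsq <= max_nsq iff (2n+m)^2 <= disc
--         if disc < 0:
--             continue  # no n at all for this m
--         r = math.isqrt(disc)
--         lo = max(-((r + m) // 2), -max_m)   # smallest n in range with nsq <= max_nsq
--         hi = min((r - m) // 2, max_m)       # largest such n
--         for n in range(lo, hi + 1):
--             if m == 0 and n == 0:
--                 continue
--             nsq = m * m + m * n + n * n
--             representations[nsq] = representations.get(nsq, 0) + 1
--     return representations
-- ===== Notes on version B (the rewrite author's own statement) =====
-- stated objective: alternative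
-- what changed: The inner scan over all n with a norm test is replaced by solving the quadratic m^2+mn+n^2 <= max_nsq for n via the integer sqrt of the discriminant, so each row visits exactly the admissible n-interval, and the two-step dict update becomes a single get/insert.
import Mathlib
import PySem

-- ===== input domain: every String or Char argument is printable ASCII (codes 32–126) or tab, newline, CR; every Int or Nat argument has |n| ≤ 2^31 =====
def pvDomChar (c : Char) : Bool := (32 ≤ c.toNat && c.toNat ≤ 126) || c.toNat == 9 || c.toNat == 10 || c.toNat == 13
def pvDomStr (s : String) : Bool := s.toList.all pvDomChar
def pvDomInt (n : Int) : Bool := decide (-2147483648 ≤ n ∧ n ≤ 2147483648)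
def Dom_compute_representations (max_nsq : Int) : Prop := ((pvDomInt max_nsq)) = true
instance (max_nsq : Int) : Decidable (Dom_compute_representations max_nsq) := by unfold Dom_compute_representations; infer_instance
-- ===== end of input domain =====

-- B replaces the full inner n-scan with the exact n-interval obtained by solving the
-- quadratic m^2+mn+n^2 <= max_nsq (integer sqrt of the discriminant) and uses a single
-- get/insert dict update; same return value (an alternative of similar cost).

-- ===== PORT A =====
-- int(math.ceil(math.sqrt(k))) : exact for integers 0 ≤ k ≤ 2^31 (double sqrt is
-- correctly rounded there and cannot round across an integer).
def pvCeilSqrt (k : Int) : Int :=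
  let s : Int := (Nat.sqrt k.toNat : Int)
  if s * s = k then s else s + 1

def compute_representations (max_nsq : Int) : List (Int × Int) :=
  let max_m : Int := pvCeilSqrt max_nsq + 10
  ((PySem.List.pyRange (-max_m) (max_m + 1) 1).foldl (fun d m =>
    (PySem.List.pyRange (-max_m) (max_m + 1) 1).foldl (fun d n =>
      if m = 0 ∧ n = 0 then d
      else
        let nsq := m * m + m * n + n * n
        if nsq > max_nsq then d
        else
          let d1 := if ¬ d.contains nsq then d.insert nsq 0 else d
          d1.modify nsq 0 (· + 1)) d)
    (PySem.Dict.empty : PySem.Dict Int Int)).items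

-- ===== PORT B =====
def compute_representations_alt (max_nsq : Int) : List (Int × Int) :=
  let s : Int := (Nat.sqrt max_nsq.toNat : Int)  -- math.isqrt(max_nsq)
  let max_m : Int := (if s * s = max_nsq then s else s + 1) + 10
  ((PySem.List.pyRange (-max_m) (max_m + 1) 1).foldl (fun d m =>
    let disc := 4 * max_nsq - 3 * m * m
    if disc < 0 then d
    else
      let r : Int := (Nat.sqrt disc.toNat : Int)  -- math.isqrt(disc)
      let lo := max (-(PySem.Int.floordiv (r + m) 2)) (-max_m)
      let hi := min (PySem.Int.floordiv (r - m) 2) max_m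
      (PySem.List.pyRange lo (hi + 1) 1).foldl (fun d n =>
        if m = 0 ∧ n = 0 then d
        else
          let nsq := m * m + m * n + n * n
          d.insert nsq (d.getD nsq 0 + 1)) d)
    (PySem.Dict.empty : PySem.Dict Int Int)).items

-- ===== PRECONDITION & SPEC =====
-- Pre_ excludes exactly the negative inputs, where A raises ValueError (math.sqrt of a negative).
def Pre_compute_representations (max_nsq : Int) : Prop := 0 ≤ max_nsq
instance (max_nsq : Int) : Decidable (Pre_compute_representations max_nsq) := by
  unfold Pre_compute_representations; infer_instance
def pvWitness_compute_representations : Int := 12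

def Spec_compute_representations (max_nsq : Int) (out : List (Int × Int)) : Prop := out = compute_representations_alt max_nsq
instance (max_nsq : Int) (out : List (Int × Int)) : Decidable (Spec_compute_representations max_nsq out) := by unfold Spec_compute_representations; infer_instance

-- ===== CLAIM (what is proved, stated in full; the proofs are below) =====
def Claim_equal_compute_representations : Prop := ∀ (max_nsq : Int), Dom_compute_representations max_nsq → Pre_compute_representations max_nsq → Spec_compute_representations max_nsq (compute_representations max_nsq)

-- ===== LEMMAS AND PROOFS =====

-- Both per-pair dict updates are the same function of the dict.
lemma pv_step_eq (d : PySem.Dict Int Int) (k : Int) :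
    (if ¬ d.contains k then d.insert k 0 else d).modify k 0 (· + 1)
      = d.insert k (d.getD k 0 + 1) := by
  by_cases h : d.contains k
  · simp [h, PySem.Dict.modify]
  · rw [if_pos h, PySem.Dict.modify, PySem.Dict.getD_insert_self, PySem.Dict.insert_insert_self,
      PySem.Dict.getD_of_not_contains d 0 (by simpa using h)]

lemma pv_pyRange_nil {a b : Int} (h : b ≤ a) : PySem.List.pyRange a b 1 = [] := by
  simp [PySem.List.pyRange]; omega

-- filtering a range by an interval condition yields the clamped subrange
lemma pv_filter_range (lo hi : Int) (p : Int → Bool)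
    (h : ∀ n, (p n = true ↔ lo ≤ n ∧ n ≤ hi)) :
    ∀ (a b : Int), (PySem.List.pyRange a b 1).filter p
      = PySem.List.pyRange (max a lo) (min b (hi + 1)) 1 := by
  intro a b
  by_cases hab : b ≤ a
  · rw [pv_pyRange_nil hab, pv_pyRange_nil (by omega)]; rfl
  · have hlt : a < b := by omega
    have : ∀ (c : Nat) (a : Int), b - a ≤ c →
        (PySem.List.pyRange a b 1).filter p
          = PySem.List.pyRange (max a lo) (min b (hi + 1)) 1 := by
      intro c
      induction c with
      | zero => intro a ha; rw [pv_pyRange_nil (by omega), pv_pyRange_nil (by omega)]; rfl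
      | succ c ih =>
        intro a ha
        by_cases hab' : b ≤ a
        · rw [pv_pyRange_nil hab', pv_pyRange_nil (by omega)]; rfl
        · rw [PySem.List.pyRange_one_cons (by omega), List.filter_cons]
          by_cases hpa : p a = true
          · have hla : lo ≤ a ∧ a ≤ hi := (h a).mp hpa
            rw [if_pos hpa, ih (a + 1) (by omega)]
            rw [show max (a + 1) lo = a + 1 by omega, show max a lo = a by omega,
              PySem.List.pyRange_one_cons (show a < min b (hi + 1) by omega)]
          · have hla : ¬ (lo ≤ a ∧ a ≤ hi) := fun hc => hpa ((h a).mpr hc)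
            rw [if_neg hpa, ih (a + 1) (by omega)]
            by_cases hcase : a < lo
            · rw [show max (a + 1) lo = max a lo by omega]
            · have hhi : hi < a := by omega
              rw [pv_pyRange_nil (by omega), pv_pyRange_nil (by omega)]
    exact this (b - a).toNat a (by omega)

-- characterisation of the norm condition by the integer sqrt of the discriminant
lemma pv_norm_iff (K m n : Int) (hd : 0 ≤ 4 * K - 3 * m * m) :
    (m * m + m * n + n * n ≤ K ↔
      -(PySem.Int.floordiv ((Nat.sqrt (4 * K - 3 * m * m).toNat : Int) + m) 2) ≤ n ∧
        n ≤ PySem.Int.floordiv ((Nat.sqrt (4 * K - 3 * m * m).toNat : Int) - m) 2) := by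
  set disc : Int := 4 * K - 3 * m * m with hdisc
  set r : Int := (Nat.sqrt disc.toNat : Int) with hrdef
  have hr0 : 0 ≤ r := by positivity
  have hr1 : r * r ≤ disc := by
    have h := Nat.sqrt_le' disc.toNat
    have h2 : ((Nat.sqrt disc.toNat ^ 2 : Nat) : Int) ≤ ((disc.toNat : Nat) : Int) :=
      Int.ofNat_le.mpr h
    push_cast at h2
    rw [pow_two] at h2
    rw [Int.toNat_of_nonneg hd] at h2
    exact h2
  have hr2 : disc < (r + 1) * (r + 1) := by
    have h := Nat.lt_succ_sqrt' disc.toNat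
    rw [Nat.succ_eq_add_one] at h
    have h2 : ((disc.toNat : Nat) : Int) < (((Nat.sqrt disc.toNat + 1) ^ 2 : Nat) : Int) :=
      Int.ofNat_lt.mpr h
    push_cast at h2
    rw [pow_two] at h2
    rw [Int.toNat_of_nonneg hd] at h2
    exact h2
  have hsq : m * m + m * n + n * n ≤ K ↔ (2 * n + m) * (2 * n + m) ≤ disc := by
    constructor <;> intro h <;> nlinarith
  have habs : (2 * n + m) * (2 * n + m) ≤ disc ↔ (-r ≤ 2 * n + m ∧ 2 * n + m ≤ r) := by
    constructor
    · intro h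
      constructor <;> nlinarith
    · rintro ⟨h1, h2⟩
      nlinarith
  have hb1 : n ≤ PySem.Int.floordiv (r - m) 2 ↔ 2 * n + m ≤ r := by
    rw [show (n ≤ PySem.Int.floordiv (r - m) 2) ↔ ¬ (PySem.Int.floordiv (r - m) 2 < n) by omega,
      PySem.Int.floordiv_lt_iff_lt_mul (by omega)]
    omega
  have hb2 : -(PySem.Int.floordiv (r + m) 2) ≤ n ↔ -r ≤ 2 * n + m := by
    rw [show (-(PySem.Int.floordiv (r + m) 2) ≤ n) ↔ ¬ (PySem.Int.floordiv (r + m) 2 < -n) by omega,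
      PySem.Int.floordiv_lt_iff_lt_mul (by omega)]
    omega
  rw [hsq, habs, hb1, hb2]

lemma pv_norm_false (K m n : Int) (hd : 4 * K - 3 * m * m < 0) :
    ¬ (m * m + m * n + n * n ≤ K) := by
  intro h; nlinarith [sq_nonneg (2 * n + m)]

-- the two row computations agree on every dict
lemma pv_row_eq (K M m : Int) (d : PySem.Dict Int Int) :
    (PySem.List.pyRange (-M) (M + 1) 1).foldl (fun d n =>
      if m = 0 ∧ n = 0 then d
      else
        let nsq := m * m + m * n + n * n
        if nsq > K then d
        else
          let d1 := if ¬ d.contains nsq then d.insert nsq 0 else d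
          d1.modify nsq 0 (· + 1)) d
    = (let disc := 4 * K - 3 * m * m
       if disc < 0 then d
       else
         let r : Int := (Nat.sqrt disc.toNat : Int)
         let lo := max (-(PySem.Int.floordiv (r + m) 2)) (-M)
         let hi := min (PySem.Int.floordiv (r - m) 2) M
         (PySem.List.pyRange lo (hi + 1) 1).foldl (fun d n =>
           if m = 0 ∧ n = 0 then d
           else
             let nsq := m * m + m * n + n * n
             d.insert nsq (d.getD nsq 0 + 1)) d) := by
  -- normalise the A-side to a fold of the common update over a doubly filtered list
  have hA : (PySem.List.pyRange (-M) (M + 1) 1).foldl (fun d n =>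
      if m = 0 ∧ n = 0 then d
      else
        let nsq := m * m + m * n + n * n
        if nsq > K then d
        else
          let d1 := if ¬ d.contains nsq then d.insert nsq 0 else d
          d1.modify nsq 0 (· + 1)) d
      = (((PySem.List.pyRange (-M) (M + 1) 1).filter
            (fun n => decide (m * m + m * n + n * n ≤ K))).filter
            (fun n => decide (¬ (m = 0 ∧ n = 0)))).foldl
          (fun d n => d.insert (m * m + m * n + n * n) (d.getD (m * m + m * n + n * n) 0 + 1)) d := by
    rw [PySem.List.foldl_congr_mem _ _
      (fun d n => if (¬ (m = 0 ∧ n = 0)) ∧ m * m + m * n + n * n ≤ K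
        then d.insert (m * m + m * n + n * n) (d.getD (m * m + m * n + n * n) 0 + 1) else d) _
      (by
        intro acc n _
        by_cases h0 : m = 0 ∧ n = 0
        · simp [h0]
        · by_cases hK : m * m + m * n + n * n ≤ K
          · simp only [if_neg h0, if_neg (show ¬ (m * m + m * n + n * n > K) by omega),
              if_pos (show (¬ (m = 0 ∧ n = 0)) ∧ m * m + m * n + n * n ≤ K from ⟨h0, hK⟩)]
            exact pv_step_eq acc _
          · simp only [if_neg h0, if_pos (show m * m + m * n + n * n > K by omega),
              if_neg (show ¬ ((¬ (m = 0 ∧ n = 0)) ∧ m * m + m * n + n * n ≤ K) by tauto)])]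
    rw [PySem.List.foldl_ite_eq_foldl_filter]
    rw [List.filter_filter]
    congr 1
    apply List.filter_congr
    intro n _
    simp [Bool.and_comm]
  rw [hA]
  by_cases hdisc : 4 * K - 3 * m * m < 0
  · simp only [if_pos hdisc]
    have hnil : ((PySem.List.pyRange (-M) (M + 1) 1).filter
        (fun n => decide (m * m + m * n + n * n ≤ K))) = [] := by
      apply List.filter_eq_nil_iff.mpr
      intro n _
      simpa using pv_norm_false K m n hdisc
    rw [hnil]
    rfl
  · simp only [if_neg hdisc]
    have hd : 0 ≤ 4 * K - 3 * m * m := by omega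
    rw [pv_filter_range (-(PySem.Int.floordiv ((Nat.sqrt (4 * K - 3 * m * m).toNat : Int) + m) 2))
          (PySem.Int.floordiv ((Nat.sqrt (4 * K - 3 * m * m).toNat : Int) - m) 2)
          _ (fun n => by simpa using pv_norm_iff K m n hd) (-M) (M + 1)]
    rw [show max (-M) (-(PySem.Int.floordiv ((Nat.sqrt (4 * K - 3 * m * m).toNat : Int) + m) 2))
        = max (-(PySem.Int.floordiv ((Nat.sqrt (4 * K - 3 * m * m).toNat : Int) + m) 2)) (-M) by omega]
    rw [show min (M + 1) (PySem.Int.floordiv ((Nat.sqrt (4 * K - 3 * m * m).toNat : Int) - m) 2 + 1)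
        = min (PySem.Int.floordiv ((Nat.sqrt (4 * K - 3 * m * m).toNat : Int) - m) 2) M + 1 by omega]
    symm
    rw [PySem.List.foldl_congr_mem _ _
      (fun (d : PySem.Dict Int Int) n => if ¬ (m = 0 ∧ n = 0)
        then d.insert (m * m + m * n + n * n) (d.getD (m * m + m * n + n * n) 0 + 1) else d) _
      (by
        intro acc n _
        by_cases h0 : m = 0 ∧ n = 0
        · simp [h0]
        · simp [h0])]
    rw [PySem.List.foldl_ite_eq_foldl_filter]

-- ===== VERDICT (by name: the statement is the Claim_ definition above) =====
theorem compute_representations_spec : Claim_equal_compute_representations := by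
  intro K _ _
  unfold Spec_compute_representations compute_representations compute_representations_alt pvCeilSqrt
  simp only []
  congr 1
  apply PySem.List.foldl_congr_mem
  intro acc m _
  exact pv_row_eq K _ m acc
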